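-- pv_equiv track=rewrite | github.com/xcmdx/Vudal | 12432.py | Vudal
-- ===== SOURCE A (Python) =====
-- def Vudal(N, K):  # таблица Вудала
--     # N- кол-во строк, K - кол-во столбцов
--     mas = [[0 for _ in range(K)] for _ in range(N)]
--     for n in range(N):
--         for k in range(K):
--             if (n + 2 > k):
--                 mas[n][k] = (n + 1) * (k + 1) ** (n + 1) - 1
--             else:
--                 mas[n][k] = 0
--     return mas, N, K
-- ===== SOURCE B (Python) =====
-- def Vudal(N, K):  # таблица Вудала: column-major build with a running power accumulator, then transpose
--     if N <= 0:  # no rows: empty table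
--         return [], N, K
--     cols = []
--     for k in range(K):
--         p = k + 1  # maintains (k+1)**(n+1) multiplicatively; no ** per cell
--         col = []
--         for n in range(N):
--             col.append((n + 1) * p - 1 if n + 2 > k else 0)
--             p *= k + 1
--         cols.append(col)
--     mas = [[cols[k][n] for k in range(K)] for n in range(N)]
--     return mas, N, K
-- ===== Notes on version B (the rewrite author's own statement) =====
-- stated objective: faster
-- what changed: Builds the table column-by-column, maintaining each column's power (k+1)**(n+1) by one multiplication per cell instead of exponentiating per cell, then transposes; the no-rows case (N <= 0) returns the empty table directly.
import Mathlib
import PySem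

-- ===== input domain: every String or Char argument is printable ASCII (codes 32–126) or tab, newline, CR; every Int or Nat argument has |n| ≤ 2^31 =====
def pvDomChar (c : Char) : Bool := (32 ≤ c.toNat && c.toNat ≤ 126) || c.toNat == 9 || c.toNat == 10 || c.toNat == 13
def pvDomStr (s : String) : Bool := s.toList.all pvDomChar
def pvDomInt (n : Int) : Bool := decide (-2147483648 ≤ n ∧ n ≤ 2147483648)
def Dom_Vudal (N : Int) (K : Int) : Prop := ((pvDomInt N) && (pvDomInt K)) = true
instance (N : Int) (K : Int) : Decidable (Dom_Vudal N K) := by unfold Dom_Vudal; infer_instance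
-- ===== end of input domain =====

-- B builds the table column-by-column, maintaining each column's power (k+1)^(n+1) by one
-- multiplication per cell instead of exponentiating per cell, and transposes at the end (objective: faster; a timing run measured B faster at the largest size).

-- ===== PORT A =====
-- A first fills an N×K zero table and then overwrites EVERY cell in the nested loop;
-- the port fuses those two passes into the nested range maps computing each cell's final value.
def Vudal (N : Int) (K : Int) : List (List Int) × Int × Int :=
  let mas := (PySem.List.pyRange 0 N 1).map (fun n =>
    (PySem.List.pyRange 0 K 1).map (fun k =>
      if n + 2 > k then (n + 1) * (k + 1) ^ ((n + 1).toNat) - 1 else 0))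
  (mas, N, K)

-- ===== PORT B =====
def Vudal_alt (N : Int) (K : Int) : List (List Int) × Int × Int :=
  if N ≤ 0 then ([], N, K) else
  let cols := (PySem.List.pyRange 0 K 1).foldl (fun cols k =>
    let s := (PySem.List.pyRange 0 N 1).foldl (fun (st : Int × List Int) n =>
      (st.1 * (k + 1), st.2 ++ [if n + 2 > k then (n + 1) * st.1 - 1 else 0]))
      (k + 1, [])
    cols ++ [s.2]) []
  let mas := (PySem.List.pyRange 0 N 1).map (fun n =>
    (PySem.List.pyRange 0 K 1).map (fun k =>
      PySem.List.pyGetD (PySem.List.pyGetD cols k []) n 0))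
  (mas, N, K)

-- ===== PRECONDITION & SPEC =====
def Spec_Vudal (N : Int) (K : Int) (out : List (List Int) × Int × Int) : Prop := out = Vudal_alt N K
instance (N : Int) (K : Int) (out : List (List Int) × Int × Int) : Decidable (Spec_Vudal N K out) := by unfold Spec_Vudal; infer_instance

-- ===== CLAIM =====
def Claim_equal_Vudal : Prop := ∀ (N : Int) (K : Int), Dom_Vudal N K → Spec_Vudal N K (Vudal N K)

-- ===== LEMMAS AND PROOFS =====

-- the value of cell (n, k) in both programs
def vudalCell (n k : Int) : Int :=
  if n + 2 > k then (n + 1) * (k + 1) ^ ((n + 1).toNat) - 1 else 0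

-- B's inner fold: the running power st.1 = (k+1)^(a.toNat+1) stays in step, and the
-- accumulated column is the map of the cell formula over the remaining range.
theorem vudal_inner_fold (N k : Int) : ∀ (a : Int), 0 ≤ a → ∀ (acc : List Int),
    ((PySem.List.pyRange a N 1).foldl (fun (st : Int × List Int) n =>
        (st.1 * (k + 1), st.2 ++ [if n + 2 > k then (n + 1) * st.1 - 1 else 0]))
      ((k + 1) ^ (a.toNat + 1), acc)).2
    = acc ++ (PySem.List.pyRange a N 1).map (fun n => vudalCell n k) := by
  intro a ha acc
  rcases (by omega : N ≤ a ∨ a < N) with h | h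
  · rw [PySem.List.pyRange_one_eq_nil h]; simp
  · rw [PySem.List.pyRange_one_cons h]
    simp only [List.foldl_cons, List.map_cons]
    have ht : (a + 1).toNat = a.toNat + 1 := by omega
    have hpow : (k + 1) ^ (a.toNat + 1) * (k + 1) = (k + 1) ^ ((a + 1).toNat + 1) := by
      rw [ht]; exact (pow_succ _ _).symm
    rw [hpow, vudal_inner_fold N k (a + 1) (by omega)]
    simp [vudalCell, ht]
termination_by a => (N - a).toNat
decreasing_by omega

-- B's cols is the list of columns of the cell formula.
theorem vudal_cols_eq (N K : Int) :
    ((PySem.List.pyRange 0 K 1).foldl (fun cols k =>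
      let s := (PySem.List.pyRange 0 N 1).foldl (fun (st : Int × List Int) n =>
        (st.1 * (k + 1), st.2 ++ [if n + 2 > k then (n + 1) * st.1 - 1 else 0]))
        (k + 1, [])
      cols ++ [s.2]) ([] : List (List Int)))
    = (PySem.List.pyRange 0 K 1).map (fun k =>
        (PySem.List.pyRange 0 N 1).map (fun n => vudalCell n k)) := by
  rw [PySem.List.foldl_append_singleton_eq_map]
  refine List.map_congr_left (fun k _ => ?_)
  have h := vudal_inner_fold N k 0 le_rfl []
  simpa using h

-- ===== VERDICT =====
theorem Vudal_spec : Claim_equal_Vudal := by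
  intro N K _
  unfold Spec_Vudal Vudal Vudal_alt
  rcases (by omega : N ≤ 0 ∨ 0 < N) with hN | hN
  · simp [hN, PySem.List.pyRange_one_eq_nil hN]
  · rw [if_neg (by omega)]
    simp only
    rw [vudal_cols_eq N K]
    refine congrArg (fun m => (m, N, K)) ?_
    refine List.map_congr_left (fun n hn => ?_)
    have hnb := PySem.List.mem_pyRange_one.mp hn
    refine List.map_congr_left (fun k hk => ?_)
    have hkb := PySem.List.mem_pyRange_one.mp hk
    rw [PySem.List.pyGetD_map_pyRange_of_nonneg _ _ _ _ hkb.1 hkb.2,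
        PySem.List.pyGetD_map_pyRange_of_nonneg _ _ _ _ hnb.1 hnb.2]
    rfl
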